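-- pv_equiv track=rewrite | github.com/Lazaraaus/gg-project | utilities/categories.py | verb_prefix
-- ===== SOURCE A (Python) =====
-- def verb_prefix(tweet):
--     tweet_lsts = []
--     for verbs in verb_prefixes:
--         split_verbs = verbs.split()
--         n = len(split_verbs)
--         indices = [i for (i, w) in enumerate(tweet) if tweet[i:i + n] == split_verbs]
--         if indices:
--             tweet_lsts.append((tweet[indices[-1] + n:], verb_prefixes[verbs]))
--     return tweet_lsts
--
-- verb_prefixes = {
--     "wins": 10,
--     "win": 5,
--     "winning": 3,
--     "will win": 1,
--     "receives": 5,
--     "receive": 5,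
--     "taking home": 3,
--     "take home": 3,
--     "takes home": 5,
--     "will present": 5,
--     "is nominated for": 3,
--     "presents": 3,
--     "nominated for": 3,
--     "to win": 5
-- }
-- ===== SOURCE B (Python) =====
-- verb_prefixes = {
--     "wins": 10,
--     "win": 5,
--     "winning": 3,
--     "will win": 1,
--     "receives": 5,
--     "receive": 5,
--     "taking home": 3,
--     "take home": 3,
--     "takes home": 5,
--     "will present": 5,
--     "is nominated for": 3,
--     "presents": 3,
--     "nominated for": 3,
--     "to win": 5
-- }
--
--
-- def verb_prefix(tweet):
--     # Hash-index the phrases by their word tuples; then one pass over the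
--     # tweet with one dict lookup per candidate length (1..longest phrase)
--     # at each position -- no per-phrase comparisons during the scan.
--     by_words = {}
--     maxlen = 0
--     for phrase in verb_prefixes:
--         words = tuple(phrase.split())
--         by_words[words] = phrase
--         if len(words) > maxlen:
--             maxlen = len(words)
--     last = {}
--     for i in range(len(tweet)):
--         for n in range(1, maxlen + 1):
--             if i + n <= len(tweet):
--                 phrase = by_words.get(tuple(tweet[i:i + n]))
--                 if phrase is not None:
--                     last[phrase] = tweet[i + n:]
--     return [(last[p], s) for p, s in verb_prefixes.items() if p in last]
-- ===== Notes on version B (the rewrite author's own statement) =====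
-- stated objective: faster
-- what changed: Replaces A's 14 separate whole-tweet scans that slice-compare every position against every phrase by a hash index keyed on word tuples: one build pass over the phrases, then a single pass over the tweet doing one dict lookup per candidate length (1..3) at each position, overwriting each phrase's last suffix, and an assembly pass in the dict's original key order.
import Mathlib
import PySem

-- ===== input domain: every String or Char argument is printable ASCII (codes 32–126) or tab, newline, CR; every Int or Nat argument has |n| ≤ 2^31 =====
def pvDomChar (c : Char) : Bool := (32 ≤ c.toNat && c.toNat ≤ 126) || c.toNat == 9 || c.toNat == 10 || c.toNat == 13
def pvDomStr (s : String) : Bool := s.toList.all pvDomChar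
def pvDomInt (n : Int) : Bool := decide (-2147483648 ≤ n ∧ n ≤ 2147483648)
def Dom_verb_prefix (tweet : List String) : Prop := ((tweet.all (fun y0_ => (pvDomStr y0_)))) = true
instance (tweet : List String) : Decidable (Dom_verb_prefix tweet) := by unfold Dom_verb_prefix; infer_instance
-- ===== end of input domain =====

-- B replaces A's 14 separate whole-tweet scans (one slice comparison per position per
-- phrase) by a hash index keyed on the phrases' word tuples: one pass over the tweet
-- does one dict lookup per candidate length (1..longest phrase) at each position,
-- remembering each phrase's last-match suffix, then assembles in key order; objective:
-- faster (lookups per position independent of the number of phrases).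

-- ===== PORT A =====
-- the module-level dict verb_prefixes, as an association list (keys distinct)
def verbPrefixes : List (String × Int) :=
  [("wins", 10), ("win", 5), ("winning", 3), ("will win", 1), ("receives", 5),
   ("receive", 5), ("taking home", 3), ("take home", 3), ("takes home", 5),
   ("will present", 5), ("is nominated for", 3), ("presents", 3),
   ("nominated for", 3), ("to win", 5)]

-- A's for-loop over the dict's keys as structural recursion; 'verb_prefixes[verbs]' on
-- this literal dict with distinct keys is the paired value vp.2; 'if indices:' followed
-- by 'indices[-1]' is the match on pyGet? indices (-1) (some ↔ nonempty).
def aLoop (tweet : List String) :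
    List (String × Int) → List (List String × Int) → List (List String × Int)
  | [], tweet_lsts => tweet_lsts
  | vp :: rest, tweet_lsts =>
    let split_verbs := PySem.Str.split₀ vp.1
    let n : Int := split_verbs.length
    let indices := (PySem.List.enumerate tweet 0).filterMap
      (fun it => if PySem.List.slice tweet (some it.1) (some (it.1 + n)) = split_verbs
                 then some it.1 else none)
    match PySem.List.pyGet? indices (-1) with
    | some last_ =>
        aLoop tweet rest
          (tweet_lsts ++ [(PySem.List.slice tweet (some (last_ + n)) none, vp.2)])
    | none => aLoop tweet rest tweet_lsts

def verb_prefix (tweet : List String) : List (List String × Int) :=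
  aLoop tweet verbPrefixes []

-- ===== PORT B =====
-- Source B's setup loop: build by_words (word-tuple -> phrase) and maxlen over the phrases
def bSetup : List (String × Int) → PySem.Dict (List String) String × Int →
    PySem.Dict (List String) String × Int
  | [], acc => acc
  | vp :: rest, acc =>
    let words := PySem.Str.split₀ vp.1
    bSetup rest (PySem.Dict.insert acc.1 words vp.1,
      if (words.length : Int) > acc.2 then (words.length : Int) else acc.2)

-- Source B's inner loop: for n in range(1, maxlen+1), one guarded dict lookup per n;
-- 'by_words.get(...) is not None' is the match on Dict.get?.
def bInner (tweet : List String) (byWords : PySem.Dict (List String) String) (i : Int) :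
    List Int → PySem.Dict String (List String) → PySem.Dict String (List String)
  | [], last_ => last_
  | n :: rest, last_ =>
    bInner tweet byWords i rest
      (if i + n ≤ PySem.List.len tweet then
         match PySem.Dict.get? byWords (PySem.List.slice tweet (some i) (some (i + n))) with
         | some p => PySem.Dict.insert last_ p (PySem.List.slice tweet (some (i + n)) none)
         | none => last_
       else last_)

-- Source B's outer loop: one pass over range(len(tweet))
def bScan (tweet : List String) (byWords : PySem.Dict (List String) String) (maxlen : Int) :
    List Int → PySem.Dict String (List String) → PySem.Dict String (List String)
  | [], last_ => last_
  | i :: rest, last_ =>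
    bScan tweet byWords maxlen rest
      (bInner tweet byWords i (PySem.List.pyRange 1 (maxlen + 1) 1) last_)

-- final comprehension of Source B: emit (last[phrase], score) in the dict's order
def bAssemble (last_ : PySem.Dict String (List String)) :
    List (String × Int) → List (List String × Int)
  | [] => []
  | vp :: rest =>
    match PySem.Dict.get? last_ vp.1 with
    | some suf => (suf, vp.2) :: bAssemble last_ rest
    | none => bAssemble last_ rest

def verb_prefix_alt (tweet : List String) : List (List String × Int) :=
  let bm := bSetup verbPrefixes (PySem.Dict.empty, 0)
  bAssemble
    (bScan tweet bm.1 bm.2 (PySem.List.pyRange 0 (PySem.List.len tweet) 1) PySem.Dict.empty)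
    verbPrefixes

-- ===== PRECONDITION & SPEC =====
def Spec_verb_prefix (tweet : List String) (out : List (List String × Int)) : Prop := out = verb_prefix_alt tweet
instance (tweet : List String) (out : List (List String × Int)) : Decidable (Spec_verb_prefix tweet out) := by unfold Spec_verb_prefix; infer_instance

-- ===== CLAIM (what is proved, stated in full; the proofs are below) =====
def Claim_equal_verb_prefix : Prop := ∀ (tweet : List String), Dom_verb_prefix tweet → Spec_verb_prefix tweet (verb_prefix tweet)

-- ===== LEMMAS AND PROOFS =====

theorem foldl_last {α γ : Type} (q : α → Prop) [DecidablePred q] (g : α → γ) :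
    ∀ (es : List α) (o : Option γ),
      es.foldl (fun o x => if q x then some (g x) else o) o
        = ((es.filterMap (fun x => if q x then some (g x) else none)).getLast?).or o := by
  intro es
  induction es with
  | nil => intro o; simp
  | cons x rest ih =>
    intro o
    simp only [List.foldl_cons, List.filterMap_cons]
    by_cases hq : q x
    · simp only [if_pos hq, ih]
      cases hrest : (rest.filterMap
          (fun x => if q x then some (g x) else none)).getLast? with
      | none => simp [List.getLast?_cons, hrest]
      | some y => simp [List.getLast?_cons, hrest]
    · simp only [if_neg hq, ih]

theorem map_foldl_opt {α γ δ : Type} (q : α → Prop) [DecidablePred q]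
    (g : α → γ) (h : γ → δ) :
    ∀ (es : List α) (o : Option γ),
      (es.foldl (fun o x => if q x then some (g x) else o) o).map h
        = es.foldl (fun o x => if q x then some (h (g x)) else o) (o.map h) := by
  intro es
  induction es with
  | nil => intro o; simp
  | cons x rest ih =>
    intro o
    simp only [List.foldl_cons, ih]
    by_cases hq : q x <;> simp [hq]

theorem aLoop_eq (tweet : List String) :
    ∀ (P : List (String × Int)) (acc : List (List String × Int)),
      aLoop tweet P acc = acc ++ P.filterMap (fun vp =>
        (((PySem.List.enumerate tweet 0).foldl
            (fun o it =>
              if PySem.List.slice tweet (some it.1)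
                   (some (it.1 + ((PySem.Str.split₀ vp.1).length : Int)))
                   = PySem.Str.split₀ vp.1
              then some it.1 else o) none)).map
          (fun j => (PySem.List.slice tweet
              (some (j + ((PySem.Str.split₀ vp.1).length : Int))) none, vp.2))) := by
  intro P
  induction P with
  | nil => intro acc; simp [aLoop]
  | cons vp rest ih =>
    intro acc
    rw [List.filterMap_cons]
    have hfold := foldl_last
      (fun it : Int × String =>
        PySem.List.slice tweet (some it.1)
            (some (it.1 + ((PySem.Str.split₀ vp.1).length : Int)))
          = PySem.Str.split₀ vp.1)
      (fun it : Int × String => it.1) (PySem.List.enumerate tweet 0) none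
    simp only [Option.or_none] at hfold
    show aLoop tweet (vp :: rest) acc = _
    rw [aLoop, PySem.List.pyGet?_neg_one]
    rw [hfold]
    cases hlast : ((PySem.List.enumerate tweet 0).filterMap
        (fun it => if PySem.List.slice tweet (some it.1)
            (some (it.1 + ((PySem.Str.split₀ vp.1).length : Int)))
            = PySem.Str.split₀ vp.1 then some it.1 else none)).getLast? with
    | none => simp [ih]
    | some j => simp [ih]

-- the literal index Source B builds, and its data facts
def bwLit : List (List String × String) :=
  [(["wins"],"wins"), (["win"],"win"), (["winning"],"winning"), (["will","win"],"will win"),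
   (["receives"],"receives"), (["receive"],"receive"), (["taking","home"],"taking home"),
   (["take","home"],"take home"), (["takes","home"],"takes home"),
   (["will","present"],"will present"), (["is","nominated","for"],"is nominated for"),
   (["presents"],"presents"), (["nominated","for"],"nominated for"), (["to","win"],"to win")]

def bwDict : PySem.Dict (List String) String := ⟨bwLit⟩

theorem bSetup_eval : bSetup verbPrefixes (PySem.Dict.empty, 0) = (bwDict, 3) := by
  decide

theorem bw_nodup : bwDict.keys.Nodup := by decide

-- the index is injective in the only way we need: a key that maps to p IS p's word list
theorem bw_key_of_get (key : List String) (p : String)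
    (h : PySem.Dict.get? bwDict key = some p) : key = PySem.Str.split₀ p := by
  rw [PySem.Dict.get?_eq_some_iff_mem_items bwDict key p bw_nodup] at h
  simp only [bwDict, bwLit, List.mem_cons, List.not_mem_nil, or_false,
    Prod.mk.injEq] at h
  rcases h with ⟨rfl,rfl⟩|⟨rfl,rfl⟩|⟨rfl,rfl⟩|⟨rfl,rfl⟩|⟨rfl,rfl⟩|⟨rfl,rfl⟩|⟨rfl,rfl⟩|
    ⟨rfl,rfl⟩|⟨rfl,rfl⟩|⟨rfl,rfl⟩|⟨rfl,rfl⟩|⟨rfl,rfl⟩|⟨rfl,rfl⟩|⟨rfl,rfl⟩ <;> decide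

-- what one step of Source B's inner loop does to the entry of a fixed phrase p
theorem bHead_get (tweet : List String) (k : Nat) (n : Int) (hn1 : 1 ≤ n)
    (p : String) (w : List String) (hw : PySem.Dict.get? bwDict w = some p)
    (last_ : PySem.Dict String (List String)) :
    PySem.Dict.get?
      (if (k:Int) + n ≤ PySem.List.len tweet then
         match PySem.Dict.get? bwDict
             (PySem.List.slice tweet (some (k:Int)) (some ((k:Int) + n))) with
         | some q => PySem.Dict.insert last_ q
             (PySem.List.slice tweet (some ((k:Int) + n)) none)
         | none => last_
       else last_) p =
      if (n = (w.length:Int) ∧ (k:Int) + (w.length:Int) ≤ (tweet.length:Int) ∧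
          PySem.List.slice tweet (some (k:Int)) (some ((k:Int) + (w.length:Int))) = w)
      then some (PySem.List.slice tweet (some ((k:Int) + (w.length:Int))) none)
      else PySem.Dict.get? last_ p := by
  have hwkey : w = PySem.Str.split₀ p := bw_key_of_get w p hw
  rw [PySem.List.len_eq]
  by_cases hg : (k:Int) + n ≤ (tweet.length:Int)
  · rw [if_pos hg]
    obtain ⟨m, rfl⟩ : ∃ m : Nat, n = (m:Int) := ⟨n.toNat, (Int.toNat_of_nonneg (by omega)).symm⟩
    cases hq : PySem.Dict.get? bwDict
        (PySem.List.slice tweet (some (k:Int)) (some ((k:Int) + (m:Int)))) with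
    | none =>
      rw [if_neg]
      rintro ⟨hnm, -, hS⟩
      obtain rfl : m = w.length := Nat.cast_inj.mp hnm
      rw [hS, hw] at hq
      cases hq
    | some q =>
      have hkey := bw_key_of_get _ q hq
      by_cases hqp : q = p
      · subst hqp
        have hkw : PySem.List.slice tweet (some (k:Int)) (some ((k:Int) + (m:Int))) = w := by
          rw [hkey, ← hwkey]
        obtain rfl : m = w.length := by
          have hlen := congrArg List.length hkw
          rw [PySem.List.slice_natCast_add] at hlen
          simp only [List.length_take, List.length_drop] at hlen
          omega
        rw [if_pos ⟨rfl, hg, hkw⟩, PySem.Dict.get?_insert_self]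
      · rw [PySem.Dict.get?_insert_of_ne _ _ (fun h => hqp h.symm), if_neg]
        rintro ⟨hnm, -, hS⟩
        obtain rfl : m = w.length := Nat.cast_inj.mp hnm
        rw [hS, hw] at hq
        exact hqp (Option.some.inj hq).symm
  · rw [if_neg hg, if_neg]
    rintro ⟨hnm, hG, -⟩
    omega

theorem bInner_get (tweet : List String) (i : Int) (hi : 0 ≤ i)
    (p : String) (w : List String) (hw : PySem.Dict.get? bwDict w = some p) :
    ∀ (ns : List Int) (last_ : PySem.Dict String (List String)),
      ns.Nodup → (∀ n ∈ ns, 1 ≤ n) →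
      PySem.Dict.get? (bInner tweet bwDict i ns last_) p =
        if ((w.length : Int) ∈ ns ∧ i + (w.length : Int) ≤ (tweet.length : Int) ∧
            PySem.List.slice tweet (some i) (some (i + (w.length : Int))) = w)
        then some (PySem.List.slice tweet (some (i + (w.length : Int))) none)
        else PySem.Dict.get? last_ p := by
  obtain ⟨k, rfl⟩ := Int.eq_ofNat_of_zero_le hi
  intro ns
  induction ns with
  | nil => intro last_ _ _; simp [bInner]
  | cons n rest ih =>
    intro last_ hnd h1
    obtain ⟨hn_nin, hndr⟩ := List.nodup_cons.mp hnd
    rw [bInner, ih _ hndr (fun x hx => h1 x (.tail _ hx)),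
        bHead_get tweet k n (h1 n (.head _)) p w hw last_]
    by_cases hmem : (w.length:Int) ∈ rest <;>
      by_cases hG : (k:Int) + (w.length:Int) ≤ (tweet.length:Int) <;>
        by_cases hS : PySem.List.slice tweet (some (k:Int))
            (some ((k:Int) + (w.length:Int))) = w <;>
          by_cases hn : n = (w.length:Int) <;>
            simp_all [List.mem_cons] <;> (rintro rfl; exact absurd rfl hn)

theorem bScan_get (tweet : List String) (p : String) (w : List String)
    (hw : PySem.Dict.get? bwDict w = some p)
    (hn : (1:Int) ≤ (w.length : Int) ∧ (w.length : Int) ≤ 3) :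
    ∀ (es : List Int) (last_ : PySem.Dict String (List String)), (∀ i ∈ es, 0 ≤ i) →
      PySem.Dict.get? (bScan tweet bwDict 3 es last_) p =
        es.foldl (fun o i =>
          if (i + (w.length : Int) ≤ (tweet.length : Int) ∧
              PySem.List.slice tweet (some i) (some (i + (w.length : Int))) = w)
          then some (PySem.List.slice tweet (some (i + (w.length : Int))) none)
          else o) (PySem.Dict.get? last_ p) := by
  intro es
  induction es with
  | nil => intro last_ _; rfl
  | cons i rest ih =>
    intro last_ hpos
    rw [bScan, ih _ (fun j hj => hpos j (.tail _ hj)), List.foldl_cons]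
    rw [bInner_get tweet i (hpos i (.head _)) p w hw _ last_
      (PySem.List.nodup_pyRange_one 1 (3 + 1))
      (fun x hx => ((PySem.List.mem_pyRange_one).mp hx).1)]
    have hmem : ((w.length : Int) ∈ PySem.List.pyRange 1 (3 + 1) 1) := by
      rw [PySem.List.mem_pyRange_one]; omega
    simp only [hmem, true_and]

theorem bAssemble_eq (last_ : PySem.Dict String (List String)) :
    ∀ (P : List (String × Int)),
      bAssemble last_ P = P.filterMap (fun vp =>
        (PySem.Dict.get? last_ vp.1).map (fun suf => (suf, vp.2))) := by
  intro P
  induction P with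
  | nil => rfl
  | cons vp rest ih =>
    rw [bAssemble, List.filterMap_cons]
    cases h : PySem.Dict.get? last_ vp.1 with
    | none => simp [ih]
    | some suf => simp [ih]

theorem filterMap_congr_mem {α β : Type} (l : List α) (f g : α → Option β)
    (h : ∀ x ∈ l, f x = g x) : l.filterMap f = l.filterMap g := by
  induction l with
  | nil => rfl
  | cons x rest ih =>
    rw [List.filterMap_cons, List.filterMap_cons, h x (.head _),
      ih (fun y hy => h y (.tail _ hy))]

theorem foldl_opt_congr {α γ : Type} :
    ∀ (l : List α) (f g : Option γ → α → Option γ),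
      (∀ o x, x ∈ l → f o x = g o x) → ∀ o, l.foldl f o = l.foldl g o := by
  intro l
  induction l with
  | nil => intro f g h o; rfl
  | cons x rest ih =>
    intro f g h o
    rw [List.foldl_cons, List.foldl_cons, h o x (.head _)]
    exact ih f g (fun o y hy => h o y (.tail _ hy)) _

-- on 0 ≤ i, a full slice match of w already forces the room check i+|w| ≤ len
theorem cond_iff (tweet w : List String) (i : Int) (h0 : 0 ≤ i) (hw : w ≠ []) :
    (PySem.List.slice tweet (some i) (some (i + (w.length : Int))) = w)
      ↔ (i + (w.length : Int) ≤ (tweet.length : Int) ∧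
         PySem.List.slice tweet (some i) (some (i + (w.length : Int))) = w) := by
  constructor
  · intro hs
    refine ⟨?_, hs⟩
    obtain ⟨k, rfl⟩ := Int.eq_ofNat_of_zero_le h0
    rw [PySem.List.slice_natCast_add] at hs
    have hl := congrArg List.length hs
    simp only [List.length_take, List.length_drop] at hl
    have : 0 < w.length := List.length_pos_of_ne_nil hw
    omega
  · exact fun h => h.2

-- ===== VERDICT (by name: the statement is the Claim_ definition above) =====
theorem verb_prefix_spec : Claim_equal_verb_prefix := by
  intro tweet _
  unfold Spec_verb_prefix verb_prefix verb_prefix_alt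
  rw [aLoop_eq, List.nil_append]
  simp only [bSetup_eval]
  rw [bAssemble_eq]
  apply filterMap_congr_mem
  intro vp hvp
  obtain ⟨hn, hwne, hw⟩ :
      ((1:Int) ≤ ((PySem.Str.split₀ vp.1).length : Int) ∧
        ((PySem.Str.split₀ vp.1).length : Int) ≤ 3) ∧
      PySem.Str.split₀ vp.1 ≠ [] ∧
      PySem.Dict.get? bwDict (PySem.Str.split₀ vp.1) = some vp.1 := by
    revert hvp; revert vp; decide
  rw [PySem.List.len_eq]
  rw [bScan_get tweet vp.1 (PySem.Str.split₀ vp.1) hw hn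
      (PySem.List.pyRange 0 (tweet.length : Int) 1) PySem.Dict.empty
      (fun i hi => ((PySem.List.mem_pyRange_one).mp hi).1)]
  rw [PySem.Dict.get?_empty]
  -- turn A's fold over enumerate into a fold over range(len(tweet))
  rw [PySem.List.enumerate_eq_map_pyRange tweet "", List.foldl_map]
  simp only [PySem.List.len_eq]
  simp only [map_foldl_opt
      (fun i : Int => i + ((PySem.Str.split₀ vp.1).length : Int) ≤ (tweet.length : Int) ∧
          PySem.List.slice tweet (some i)
            (some (i + ((PySem.Str.split₀ vp.1).length : Int))) = PySem.Str.split₀ vp.1)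
      (fun i : Int => PySem.List.slice tweet
          (some (i + ((PySem.Str.split₀ vp.1).length : Int))) none)
      (fun suf => (suf, vp.2)),
    map_foldl_opt
      (fun i : Int => PySem.List.slice tweet (some i)
          (some (i + ((PySem.Str.split₀ vp.1).length : Int))) = PySem.Str.split₀ vp.1)
      (fun i : Int => i)
      (fun j => (PySem.List.slice tweet
          (some (j + ((PySem.Str.split₀ vp.1).length : Int))) none, vp.2)),
    Option.map_none]
  apply foldl_opt_congr
  intro o x hx
  obtain ⟨h0, hlt⟩ := (PySem.List.mem_pyRange_one).mp hx
  by_cases hc : PySem.List.slice tweet (some x)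
      (some (x + ((PySem.Str.split₀ vp.1).length : Int))) = PySem.Str.split₀ vp.1
  · rw [if_pos hc, if_pos ((cond_iff tweet (PySem.Str.split₀ vp.1) x h0 hwne).mp hc)]
  · rw [if_neg hc, if_neg (fun h => hc h.2)]
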